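-- pv_equiv track=rewrite | github.com/Zhyun18/codetree-TILs | 240325/1이 되는 순간까지/until-the-moment-I-reach-one.py | solution
-- ===== SOURCE A (Python) =====
-- def solution(n):
--     cnt=0
--     if n==1:
--         return cnt
--     if n%2==0:
--         cnt+=1
--         return solution(n//2) + cnt
--     else:
--         cnt+=1
--         return solution(n//3) + cnt
-- ===== SOURCE B (Python) =====
-- def solution(n):
--     cnt = 0
--     while n != 1:
--         cnt += 1
--         n = n // 2 if n % 2 == 0 else n // 3
--     return cnt
-- ===== Notes on version B (the rewrite author's own statement) =====
-- stated objective: simpler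
-- what changed: Replaces the recursive step-counting (summing +1 up the call stack) with an iterative while-loop that maintains a running counter, avoiding recursion depth entirely.
-- outside the precondition, e.g. on solution(0): A raises RecursionError, B does not finish within the time limit
import Mathlib
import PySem

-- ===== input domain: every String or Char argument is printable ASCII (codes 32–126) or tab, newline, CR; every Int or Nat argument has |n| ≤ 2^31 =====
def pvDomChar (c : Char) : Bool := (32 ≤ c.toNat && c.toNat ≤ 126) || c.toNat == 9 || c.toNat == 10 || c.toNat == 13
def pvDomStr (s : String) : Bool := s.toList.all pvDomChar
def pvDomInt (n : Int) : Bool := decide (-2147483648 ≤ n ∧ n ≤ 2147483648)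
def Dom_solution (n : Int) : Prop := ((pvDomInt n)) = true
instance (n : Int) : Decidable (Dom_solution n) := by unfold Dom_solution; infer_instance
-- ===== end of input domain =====

-- B rewrites A's recursion (which sums +1 up the call stack) as an iterative loop with a running counter; same value everywhere A terminates.

-- ===== PORT A =====
-- Literal port of A's recursion. For n ≤ 0 Python recurses forever (RecursionError);
-- those inputs are outside Pre_solution, and the 'n ≤ 0 → 0' guard only makes the Lean
-- function total there (no behaviour is claimed outside Pre_).
def solution (n : Int) : Int :=
  if n = 1 then 0
  else if n ≤ 0 then 0
  else if PySem.Int.mod n 2 = 0 then solution (PySem.Int.floordiv n 2) + 1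
  else solution (PySem.Int.floordiv n 3) + 1
termination_by n.toNat
decreasing_by
  · have h2 : PySem.Int.floordiv n 2 = n / 2 := PySem.Int.floordiv_eq_ediv_of_pos (by omega)
    rw [h2]; omega
  · have h3 : PySem.Int.floordiv n 3 = n / 3 := PySem.Int.floordiv_eq_ediv_of_pos (by omega)
    rw [h3]; omega

-- ===== PORT B =====
-- Port of Source B's while-loop, with fuel n.toNat (more than enough steps for n ≥ 1;
-- the fuel only makes the loop total in Lean).
def solutionAltLoop : Nat → Int → Int → Int
  | 0, _, cnt => cnt
  | fuel + 1, n, cnt =>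
    if n = 1 then cnt
    else solutionAltLoop fuel
      (if PySem.Int.mod n 2 = 0 then PySem.Int.floordiv n 2 else PySem.Int.floordiv n 3)
      (cnt + 1)

def solution_alt (n : Int) : Int := solutionAltLoop n.toNat n 0

-- ===== PRECONDITION & SPEC =====
-- Pre_ excludes n ≤ 0, on which Python's A never returns (infinite recursion → RecursionError).
def Pre_solution (n : Int) : Prop := 1 ≤ n
instance (n : Int) : Decidable (Pre_solution n) := by unfold Pre_solution; infer_instance
def pvWitness_solution : Int := 12

def Spec_solution (n : Int) (out : Int) : Prop := out = solution_alt n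
instance (n : Int) (out : Int) : Decidable (Spec_solution n out) := by unfold Spec_solution; infer_instance

-- ===== CLAIM (what is proved, stated in full; the proofs are below) =====
def Claim_equal_solution : Prop := ∀ (n : Int), Dom_solution n → Pre_solution n → Spec_solution n (solution n)

-- ===== LEMMAS AND PROOFS =====

-- Loop invariant: with enough fuel, the iterative loop computes A's recursive count plus the accumulator.
theorem solutionAltLoop_eq (fuel : Nat) : ∀ (n cnt : Int), 1 ≤ n → n.toNat ≤ fuel →
    solutionAltLoop fuel n cnt = solution n + cnt := by
  induction fuel with
  | zero => intro n cnt h1 hf; omega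
  | succ fuel ih =>
    intro n cnt h1 hf
    rw [solutionAltLoop, solution]
    by_cases hn1 : n = 1
    · simp [hn1]
    · have h2 : 2 ≤ n := by omega
      have e2 : PySem.Int.floordiv n 2 = n / 2 := PySem.Int.floordiv_eq_ediv_of_pos (by omega)
      have e3 : PySem.Int.floordiv n 3 = n / 3 := PySem.Int.floordiv_eq_ediv_of_pos (by omega)
      have em : PySem.Int.mod n 2 = n % 2 := PySem.Int.mod_eq_emod_of_pos (by omega)
      rw [em]
      simp only [hn1, if_false, if_neg (by omega : ¬ n ≤ 0)]
      by_cases hm : n % 2 = 0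
      · rw [if_pos hm, if_pos hm, ih _ _ (by rw [e2]; omega) (by rw [e2]; omega)]
        ring
      · rw [if_neg hm, if_neg hm, ih _ _ (by rw [e3]; omega) (by rw [e3]; omega)]
        ring

-- ===== VERDICT (by name: the statement is the Claim_ definition above) =====
theorem solution_spec : Claim_equal_solution := by
  intro n _ hpre
  unfold Spec_solution solution_alt
  rw [solutionAltLoop_eq n.toNat n 0 hpre (le_refl _)]
  ring
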